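-- pv_equiv track=rewrite | github.com/linzeyang/leetcode-solutions | medium/2145.py | numberOfArrays
-- ===== SOURCE A (Python) =====
-- from typing import List
--
-- def numberOfArrays(differences: List[int], lower: int, upper: int) -> int:
--     offset = minn = maxx = 0
--
--     for diff in differences:
--         offset += diff
--
--         maxx = max(maxx, offset)
--         minn = min(minn, offset)
--
--     max_diff = maxx - minn
--
--     if upper - lower >= max_diff:
--         return upper - lower - max_diff + 1
--
--     return 0
-- ===== SOURCE B (Python) =====
-- def numberOfArrays(differences, lower, upper):
--     # Maintain the interval [lo, hi] of feasible starting values: scan the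
--     # differences BACKWARDS, and for each difference d the start must map into
--     # the tail's feasible interval shifted by -d, clipped to [lower, upper].
--     # No prefix sums and no running extrema are ever computed.
--     lo, hi = lower, upper
--     for d in reversed(differences):
--         lo, hi = max(lower, lo - d), min(upper, hi - d)
--     return hi - lo + 1 if hi >= lo else 0
-- ===== Notes on version B (the rewrite author's own statement) =====
-- stated objective: alternative
-- what changed: Replaces A's forward prefix-sum pass with running min/max (then a closed-form count) by a backward interval-propagation algorithm: B maintains the interval [lo, hi] of feasible starting values, shifting it by each difference and clipping to [lower, upper], and returns the final interval's size.
import Mathlib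
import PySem

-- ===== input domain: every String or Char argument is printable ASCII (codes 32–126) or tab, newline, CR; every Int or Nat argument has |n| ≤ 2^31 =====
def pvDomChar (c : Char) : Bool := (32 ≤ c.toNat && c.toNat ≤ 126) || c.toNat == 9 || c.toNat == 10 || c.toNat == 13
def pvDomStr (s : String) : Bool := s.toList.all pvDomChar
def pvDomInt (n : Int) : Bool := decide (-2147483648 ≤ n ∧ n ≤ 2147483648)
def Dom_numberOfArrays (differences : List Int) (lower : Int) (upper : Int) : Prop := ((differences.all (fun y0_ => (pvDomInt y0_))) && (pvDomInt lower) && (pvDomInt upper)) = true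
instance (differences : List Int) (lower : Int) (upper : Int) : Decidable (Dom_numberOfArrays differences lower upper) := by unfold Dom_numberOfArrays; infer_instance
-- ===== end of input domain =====

-- B replaces A's forward prefix-sum pass with running extrema by a backward
-- interval-propagation algorithm: it maintains the interval of feasible
-- starting values, shifted by each difference and clipped to [lower, upper].

-- ===== PORT A =====
def numberOfArrays (differences : List Int) (lower : Int) (upper : Int) : Int :=
  -- state = (offset, minn, maxx)
  let s := differences.foldl (fun (st : Int × Int × Int) diff =>
    let offset := st.1 + diff
    (offset, min st.2.1 offset, max st.2.2 offset)) (0, 0, 0)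
  let max_diff := s.2.2 - s.2.1
  if upper - lower ≥ max_diff then upper - lower - max_diff + 1 else 0

-- ===== PORT B =====
def numberOfArrays_alt (differences : List Int) (lower : Int) (upper : Int) : Int :=
  -- 'for d in reversed(differences)' updating (lo, hi)
  let st := differences.reverse.foldl (fun (st : Int × Int) d =>
    (max lower (st.1 - d), min upper (st.2 - d))) (lower, upper)
  if st.2 ≥ st.1 then st.2 - st.1 + 1 else 0

-- ===== PRECONDITION & SPEC =====
def Spec_numberOfArrays (differences : List Int) (lower : Int) (upper : Int) (out : Int) : Prop := out = numberOfArrays_alt differences lower upper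
instance (differences : List Int) (lower : Int) (upper : Int) (out : Int) : Decidable (Spec_numberOfArrays differences lower upper out) := by unfold Spec_numberOfArrays; infer_instance

-- ===== CLAIM (what is proved, stated in full; the proofs are below) =====
def Claim_equal_numberOfArrays : Prop := ∀ (differences : List Int) (lower : Int) (upper : Int), Dom_numberOfArrays differences lower upper → Spec_numberOfArrays differences lower upper (numberOfArrays differences lower upper)

-- ===== LEMMAS AND PROOFS =====

-- min / max over the prefix sums of ds, 0 (the empty prefix) included
def pvPmin : List Int → Int
  | [] => 0
  | d :: rest => min 0 (d + pvPmin rest)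

def pvPmax : List Int → Int
  | [] => 0
  | d :: rest => max 0 (d + pvPmax rest)

theorem pvPmin_nonpos : ∀ ds : List Int, pvPmin ds ≤ 0 := by
  intro ds; cases ds <;> simp [pvPmin]

theorem pvPmax_nonneg : ∀ ds : List Int, 0 ≤ pvPmax ds := by
  intro ds; cases ds <;> simp [pvPmax]

-- A's fused fold computes exactly (offset, running min, running max) of the
-- prefix sums, provided the initial state satisfies mn ≤ o ≤ mx.
theorem pvFoldA_eq : ∀ (ds : List Int) (o mn mx : Int), mn ≤ o → o ≤ mx →
    ds.foldl (fun (st : Int × Int × Int) diff =>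
      let offset := st.1 + diff
      (offset, min st.2.1 offset, max st.2.2 offset)) (o, mn, mx)
    = (o + ds.sum, min mn (o + pvPmin ds), max mx (o + pvPmax ds)) := by
  intro ds
  induction ds with
  | nil => intro o mn mx h1 h2; simp [pvPmin, pvPmax]; omega
  | cons d rest ih =>
    intro o mn mx h1 h2
    simp only [List.foldl_cons, List.sum_cons]
    rw [ih (o + d) (min mn (o + d)) (max mx (o + d)) (by omega) (by omega)]
    have hm := pvPmin_nonpos rest
    have hM := pvPmax_nonneg rest
    simp only [pvPmin, pvPmax]
    refine Prod.ext (by ring) (Prod.ext ?_ ?_) <;> simp <;> omega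

-- B's backward clipping fold computes (lower - pvPmin ds, upper - pvPmax ds).
theorem pvFoldB_eq : ∀ (ds : List Int) (lower upper : Int),
    ds.reverse.foldl (fun (st : Int × Int) d =>
      (max lower (st.1 - d), min upper (st.2 - d))) (lower, upper)
    = (lower - pvPmin ds, upper - pvPmax ds) := by
  intro ds lower upper
  rw [List.foldl_reverse]
  induction ds with
  | nil => simp [pvPmin, pvPmax]
  | cons d rest ih =>
    simp only [List.foldr_cons, ih, pvPmin, pvPmax]
    refine Prod.ext ?_ ?_ <;> simp <;> omega

-- ===== VERDICT (by name: the statement is the Claim_ definition above) =====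
theorem numberOfArrays_spec : Claim_equal_numberOfArrays := by
  intro differences lower upper _
  unfold Spec_numberOfArrays numberOfArrays numberOfArrays_alt
  rw [pvFoldA_eq differences 0 0 0 le_rfl le_rfl, pvFoldB_eq]
  have hm := pvPmin_nonpos differences
  have hM := pvPmax_nonneg differences
  simp only [zero_add, min_eq_right hm, max_eq_right hM]
  split_ifs <;> simp_all <;> omega
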